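-- pv_equiv track=rewrite | github.com/cdlewis/snowboardkids2-decomp | tools/project_status.py | filter_adjacent_nonmatching
-- ===== SOURCE A (Python) =====
-- from typing import List, Tuple, Set
--
-- def filter_adjacent_nonmatching(nonmatching_symbols: Set[str],
--                                 symbols: List[Tuple[str, int, int, str]]) -> List[str]:
--     """
--     Filter out adjacent non-matching symbols, keeping only the first one.
--
--     If symbols A, B, C are adjacent and all non-matching, only keep A.
--     """
--     # Create a map of symbol name to index
--     symbol_map = {name: i for i, (name, _, _, _) in enumerate(symbols)}
--
--     # Filter out adjacent symbols
--     filtered = []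
--     skip_until = -1
--
--     for i, (name, _, _, _) in enumerate(symbols):
--         if name in nonmatching_symbols:
--             if i > skip_until:
--                 filtered.append(name)
--
--                 # Check if next symbols are also non-matching
--                 j = i + 1
--                 while j < len(symbols) and symbols[j][0] in nonmatching_symbols:
--                     j += 1
--                 skip_until = j - 1
--
--     return filtered
-- ===== SOURCE B (Python) =====
-- from typing import List, Tuple, Set
--
-- def filter_adjacent_nonmatching(nonmatching_symbols: Set[str],
--                                 symbols: List[Tuple[str, int, int, str]]) -> List[str]:
--     """Keep the first symbol of each adjacent run of non-matching symbols."""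
--     filtered = []
--     prev_nonmatching = False
--     for name, _, _, _ in symbols:
--         cur = name in nonmatching_symbols
--         if cur and not prev_nonmatching:
--             filtered.append(name)
--         prev_nonmatching = cur
--     return filtered
-- ===== Notes on version B (the rewrite author's own statement) =====
-- stated objective: simpler
-- what changed: Replaced the index-based loop with an inner look-ahead scan and skip_until bookkeeping (plus an unused symbol_map dict) by a single flat pass carrying one boolean look-behind flag.
import Mathlib
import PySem

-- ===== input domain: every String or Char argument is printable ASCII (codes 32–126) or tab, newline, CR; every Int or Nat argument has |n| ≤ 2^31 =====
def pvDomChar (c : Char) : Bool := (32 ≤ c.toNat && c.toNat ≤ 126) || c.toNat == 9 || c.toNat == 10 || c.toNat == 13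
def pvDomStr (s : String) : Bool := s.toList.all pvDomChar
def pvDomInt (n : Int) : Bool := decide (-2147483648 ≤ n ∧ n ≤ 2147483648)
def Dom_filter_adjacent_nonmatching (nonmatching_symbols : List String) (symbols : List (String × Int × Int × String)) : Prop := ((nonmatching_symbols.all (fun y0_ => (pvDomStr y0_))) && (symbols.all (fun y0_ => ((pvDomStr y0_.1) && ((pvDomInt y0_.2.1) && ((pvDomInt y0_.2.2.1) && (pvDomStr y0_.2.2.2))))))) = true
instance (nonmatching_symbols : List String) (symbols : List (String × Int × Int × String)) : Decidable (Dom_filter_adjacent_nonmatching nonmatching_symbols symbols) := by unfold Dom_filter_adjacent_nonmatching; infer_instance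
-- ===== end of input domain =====

-- B replaces A's skip_until/look-ahead scan (and its unused symbol_map) by one flat pass with a look-behind boolean; objective: simpler.

-- ===== PORT A =====
-- the inner `while j < len(symbols) and symbols[j][0] in nonmatching_symbols: j += 1` scan: returns the final j
def pvRunEnd (nonmatching_symbols : List String) (symbols : List (String × Int × Int × String)) (j : Nat) : Nat :=
  if h : j < symbols.length then
    if nonmatching_symbols.contains (symbols[j]).1 then pvRunEnd nonmatching_symbols symbols (j + 1) else j
  else j
termination_by symbols.length - j

-- the `for i, (name, _, _, _) in enumerate(symbols)` loop, carrying i, filtered, skip_until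
def pvLoopA (nonmatching_symbols : List String) (symbols : List (String × Int × Int × String)) :
    List (String × Int × Int × String) → Nat → List String → Int → List String
  | [], _, filtered, _ => filtered
  | (name, _, _, _) :: rest, i, filtered, skip_until =>
    if nonmatching_symbols.contains name then
      if (i : Int) > skip_until then
        pvLoopA nonmatching_symbols symbols rest (i + 1) (filtered ++ [name])
          ((pvRunEnd nonmatching_symbols symbols (i + 1) : Int) - 1)
      else pvLoopA nonmatching_symbols symbols rest (i + 1) filtered skip_until
    else pvLoopA nonmatching_symbols symbols rest (i + 1) filtered skip_until

def filter_adjacent_nonmatching (nonmatching_symbols : List String) (symbols : List (String × Int × Int × String)) : List String :=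
  -- symbol_map = {name: i for i, (name, _, _, _) in enumerate(symbols)}  (built and never used, as in A)
  let _symbol_map : PySem.Dict String Int :=
    (PySem.List.enumerate symbols 0).foldl (fun d p => d.insert p.2.1 (p.1 : Int)) PySem.Dict.empty
  pvLoopA nonmatching_symbols symbols symbols 0 [] (-1)

-- ===== PORT B =====
def pvLoopB (nonmatching_symbols : List String) :
    List (String × Int × Int × String) → Bool → List String → List String
  | [], _, filtered => filtered
  | (name, _, _, _) :: rest, prev, filtered =>
    let cur := nonmatching_symbols.contains name
    pvLoopB nonmatching_symbols rest cur (if cur && !prev then filtered ++ [name] else filtered)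

def filter_adjacent_nonmatching_alt (nonmatching_symbols : List String) (symbols : List (String × Int × Int × String)) : List String :=
  pvLoopB nonmatching_symbols symbols false []

-- ===== PRECONDITION & SPEC =====
def Spec_filter_adjacent_nonmatching (nonmatching_symbols : List String) (symbols : List (String × Int × Int × String)) (out : List String) : Prop := out = filter_adjacent_nonmatching_alt nonmatching_symbols symbols
instance (nonmatching_symbols : List String) (symbols : List (String × Int × Int × String)) (out : List String) : Decidable (Spec_filter_adjacent_nonmatching nonmatching_symbols symbols out) := by unfold Spec_filter_adjacent_nonmatching; infer_instance

-- ===== CLAIM (what is proved, stated in full; the proofs are below) =====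
def Claim_equal_filter_adjacent_nonmatching : Prop := ∀ (nonmatching_symbols : List String) (symbols : List (String × Int × Int × String)), Dom_filter_adjacent_nonmatching nonmatching_symbols symbols → Spec_filter_adjacent_nonmatching nonmatching_symbols symbols (filter_adjacent_nonmatching nonmatching_symbols symbols)

-- ===== LEMMAS AND PROOFS =====

lemma pvRunEnd_ge (nm : List String) (symbols : List (String × Int × Int × String)) (j : Nat) :
    j ≤ pvRunEnd nm symbols j := by
  fun_induction pvRunEnd <;> omega

lemma pvRunEnd_pos (nm : List String) (symbols : List (String × Int × Int × String)) {j : Nat}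
    {x : String × Int × Int × String} (hget : symbols[j]? = some x) (hx : nm.contains x.1 = true) :
    pvRunEnd nm symbols j = pvRunEnd nm symbols (j + 1) := by
  have hj : j < symbols.length := by
    by_contra h
    simp [List.getElem?_eq_none (by omega : symbols.length ≤ j)] at hget
  have hx' : symbols[j] = x := by
    have := List.getElem?_eq_getElem hj
    rw [hget] at this; exact (Option.some.inj this).symm
  have hm : x.1 ∈ nm := by simpa using hx
  rw [pvRunEnd]; simp [hj, hx', hm]

lemma pvRunEnd_neg (nm : List String) (symbols : List (String × Int × Int × String)) {j : Nat}
    {x : String × Int × Int × String} (hget : symbols[j]? = some x) (hx : nm.contains x.1 = false) :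
    pvRunEnd nm symbols j = j := by
  have hj : j < symbols.length := by
    by_contra h
    simp [List.getElem?_eq_none (by omega : symbols.length ≤ j)] at hget
  have hx' : symbols[j] = x := by
    have := List.getElem?_eq_getElem hj
    rw [hget] at this; exact (Option.some.inj this).symm
  have hm : x.1 ∉ nm := by simpa using hx
  rw [pvRunEnd]; simp [hj, hx', hm]

-- main invariant: A's (i, skip_until) state and B's look-behind flag walk in lock-step
lemma pvLoop_eq (nm : List String) (symbols : List (String × Int × Int × String)) :
    ∀ (l : List (String × Int × Int × String)) (k : Nat) (acc : List String) (s : Int) (prev : Bool),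
      symbols.drop k = l →
      ((k : Int) ≤ s → s + 1 = (pvRunEnd nm symbols k : Int)) →
      (∀ x rest, l = x :: rest → nm.contains x.1 = true → (prev = true ↔ (k : Int) ≤ s)) →
      pvLoopA nm symbols l k acc s = pvLoopB nm l prev acc := by
  intro l
  induction l with
  | nil => intro k acc s prev _ _ _; rfl
  | cons x rest ih =>
    obtain ⟨name, a1, a2, a3⟩ := x
    intro k acc s prev hdrop hinv hbic
    have hget : symbols[k]? = some (name, a1, a2, a3) := by
      have h0 : (symbols.drop k)[0]? = some (name, a1, a2, a3) := by rw [hdrop]; rfl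
      rw [List.getElem?_drop] at h0; simpa using h0
    have hrest : symbols.drop (k + 1) = rest := by
      have : (symbols.drop k).drop 1 = rest := by rw [hdrop]; rfl
      simpa [List.drop_drop] using this
    cases hc : nm.contains name with
    | false =>
      have hm : name ∉ nm := by simpa using hc
      have hA : pvLoopA nm symbols ((name, a1, a2, a3) :: rest) k acc s
          = pvLoopA nm symbols rest (k + 1) acc s := by simp [pvLoopA, hm]
      have hB : pvLoopB nm ((name, a1, a2, a3) :: rest) prev acc
          = pvLoopB nm rest false acc := by simp [pvLoopB, hm]
      rw [hA, hB]
      apply ih (k + 1) acc s false hrest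
      · intro h
        have := hinv (by omega)
        rw [pvRunEnd_neg nm symbols hget hc] at this
        omega
      · intro x' rest' _ _
        constructor
        · intro h; simp at h
        · intro h
          have := hinv (by omega)
          rw [pvRunEnd_neg nm symbols hget hc] at this
          omega
    | true =>
      have hm : name ∈ nm := by simpa using hc
      have hbc := hbic _ _ rfl hc
      cases prev with
      | true =>
        have hks : (k : Int) ≤ s := hbc.mp rfl
        have hA : pvLoopA nm symbols ((name, a1, a2, a3) :: rest) k acc s
            = pvLoopA nm symbols rest (k + 1) acc s := by
          have hlt : ¬ s < (k : Int) := by omega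
          simp [pvLoopA, hm, hlt]
        have hB : pvLoopB nm ((name, a1, a2, a3) :: rest) true acc
            = pvLoopB nm rest true acc := by simp [pvLoopB, hm]
        rw [hA, hB]
        have hrun : s + 1 = (pvRunEnd nm symbols (k + 1) : Int) := by
          rw [← pvRunEnd_pos nm symbols hget hc]; exact hinv hks
        apply ih (k + 1) acc s true hrest (fun _ => hrun)
        intro x' rest' heq hc'
        have hget' : symbols[k + 1]? = some x' := by
          have h0 : (symbols.drop (k + 1))[0]? = some x' := by rw [hrest, heq]; rfl
          rw [List.getElem?_drop] at h0; simpa using h0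
        have h2 : pvRunEnd nm symbols (k + 1) = pvRunEnd nm symbols (k + 2) := by
          exact pvRunEnd_pos nm symbols hget' hc'
        have h3 := pvRunEnd_ge nm symbols (k + 2)
        constructor
        · intro _; omega
        · intro _; rfl
      | false =>
        have hks : ¬ ((k : Int) ≤ s) := fun h => by simpa using hbc.mpr h
        have hA : pvLoopA nm symbols ((name, a1, a2, a3) :: rest) k acc s
            = pvLoopA nm symbols rest (k + 1) (acc ++ [name])
                ((pvRunEnd nm symbols (k + 1) : Int) - 1) := by
          have hlt : s < (k : Int) := by omega
          simp [pvLoopA, hm, hlt]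
        have hB : pvLoopB nm ((name, a1, a2, a3) :: rest) false acc
            = pvLoopB nm rest true (acc ++ [name]) := by simp [pvLoopB, hm]
        rw [hA, hB]
        apply ih (k + 1) (acc ++ [name]) _ true hrest
        · intro _; omega
        · intro x' rest' heq hc'
          have hget' : symbols[k + 1]? = some x' := by
            have h0 : (symbols.drop (k + 1))[0]? = some x' := by rw [hrest, heq]; rfl
            rw [List.getElem?_drop] at h0; simpa using h0
          have h2 : pvRunEnd nm symbols (k + 1) = pvRunEnd nm symbols (k + 2) := by
            exact pvRunEnd_pos nm symbols hget' hc'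
          have h3 := pvRunEnd_ge nm symbols (k + 2)
          constructor
          · intro _; omega
          · intro _; rfl

-- ===== VERDICT (by name: the statement is the Claim_ definition above) =====
theorem filter_adjacent_nonmatching_spec : Claim_equal_filter_adjacent_nonmatching := by
  intro nm symbols _
  unfold Spec_filter_adjacent_nonmatching filter_adjacent_nonmatching filter_adjacent_nonmatching_alt
  apply pvLoop_eq nm symbols symbols 0 [] (-1) false List.drop_zero
  · intro h; omega
  · intro x rest _ _
    constructor
    · intro h; simp at h
    · intro h; omega
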